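-- pv_equiv track=rewrite | github.com/hozzang-98/Study | 프로그래머스/1/135808. 과일 장수/과일 장수.py | solution
-- ===== SOURCE A (Python) =====
-- def solution(k, m, score):
--     answer = 0
--
--     score = sorted(score) # 1,1,1,2,2,3,3
--
--     if len(score) < m:
--
--         return 0
--
--     while True:
--
--         tmp = []
--
--         for i in range(m):
--
--             tmp.append(score.pop())
--
--         answer += min(tmp) * len(tmp)
--
--         if len(score) < m:
--
--             break
--
--     return answer
-- ===== SOURCE B (Python) =====
-- def solution(k, m, score):
--     # Frequency table + prefix counting over distinct values in descending order:
--     # a box completes at every m-th element consumed, and its minimum is the value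
--     # being consumed at that boundary. Never expands/sorts the full list, no min().
--     cnt = {}
--     for v in score:
--         cnt[v] = cnt.get(v, 0) + 1
--     total = 0
--     seen = 0
--     for v in sorted(cnt, reverse=True):
--         c = cnt[v]
--         total += v * m * ((seen + c) // m - seen // m)
--         seen += c
--     return total
-- ===== Notes on version B (the rewrite author's own statement) =====
-- stated objective: alternative
-- what changed: B replaces the sort-then-pop-groups-of-m loop with a frequency table over distinct values scanned in descending order, deriving each completed box's minimum by prefix counting ((seen+c)//m - seen//m) instead of materialising boxes and calling min().
import Mathlib
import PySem

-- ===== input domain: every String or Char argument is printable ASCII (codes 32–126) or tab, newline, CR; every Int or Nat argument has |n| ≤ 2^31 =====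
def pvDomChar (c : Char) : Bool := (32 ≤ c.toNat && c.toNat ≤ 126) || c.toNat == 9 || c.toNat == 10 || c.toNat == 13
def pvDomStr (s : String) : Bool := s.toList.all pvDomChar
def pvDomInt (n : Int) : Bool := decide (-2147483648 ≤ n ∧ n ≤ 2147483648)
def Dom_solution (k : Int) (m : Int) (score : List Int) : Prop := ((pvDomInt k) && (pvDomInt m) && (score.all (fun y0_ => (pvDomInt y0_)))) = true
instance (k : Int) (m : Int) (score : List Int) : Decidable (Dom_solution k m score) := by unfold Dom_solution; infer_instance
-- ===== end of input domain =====

-- B replaces A's sort-then-pop-boxes-of-m loop by a frequency table scanned over the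
-- distinct values in descending order with prefix counting (alternative decomposition).

-- ===== PORT A =====
-- inner loop: 'for i in range(m): tmp.append(score.pop())' — range(m) has m.toNat items;
-- none = Python's IndexError (pop from empty list)
def innerA : Nat → List Int → List Int → Option (List Int × List Int)
  | 0, tmp, s => some (tmp, s)
  | t+1, tmp, s =>
    match PySem.List.pop? s with
    | none => none
    | some (x, s') => innerA t (tmp ++ [x]) s'

-- 'while True' loop with fuel; the values returned on the none branches are never
-- reached under Pre_solution (they are Python's IndexError/ValueError for m ≤ 0)
def outerA (m : Int) : Nat → List Int → Int → Int
  | 0, _, ans => ans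
  | fuel+1, s, ans =>
    match innerA m.toNat [] s with
    | none => ans
    | some (tmp, s') =>
      match PySem.List.min? tmp (fun x => x) with
      | none => ans
      | some mn =>
        let ans' := ans + mn * (tmp.length : Int)
        if (s'.length : Int) < m then ans' else outerA m fuel s' ans'

def solution (k : Int) (m : Int) (score : List Int) : Int :=
  let s := PySem.List.sorted score (fun x => x)
  if (s.length : Int) < m then 0 else outerA m s.length s 0

-- ===== PORT B =====
def solution_alt (k : Int) (m : Int) (score : List Int) : Int :=
  let cnt : PySem.Dict Int Int :=
    score.foldl (fun d v => d.insert v (d.getD v 0 + 1)) PySem.Dict.empty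
  let ks := PySem.List.sorted cnt.keys (fun x => x) true
  -- 'cnt[v]' with v a key of cnt: getD is exact here
  (ks.foldl (fun (p : Int × Int) v =>
      let c := cnt.getD v 0
      (p.1 + v * m * (PySem.Int.floordiv (p.2 + c) m - PySem.Int.floordiv p.2 m),
       p.2 + c)) ((0 : Int), (0 : Int))).1

-- ===== PRECONDITION & SPEC =====
-- For m ≤ 0 the Python A always raises ValueError (range(m) is empty, so min([]) is hit),
-- so exactly the inputs with m ≥ 1 are admitted.
def Pre_solution (k : Int) (m : Int) (score : List Int) : Prop := 1 ≤ m
instance (k : Int) (m : Int) (score : List Int) : Decidable (Pre_solution k m score) := by unfold Pre_solution; infer_instance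
def pvWitness_solution : Int × Int × List Int := (4, 3, [1, 2, 3, 1, 2, 3, 1])

def Spec_solution (k : Int) (m : Int) (score : List Int) (out : Int) : Prop := out = solution_alt k m score
instance (k : Int) (m : Int) (score : List Int) (out : Int) : Decidable (Spec_solution k m score out) := by unfold Spec_solution; infer_instance

-- ===== CLAIM (what is proved, stated in full; the proofs are below) =====
def Claim_equal_solution : Prop := ∀ (k : Int) (m : Int) (score : List Int), Dom_solution k m score → Pre_solution k m score → Spec_solution k m score (solution k m score)

-- ===== LEMMAS AND PROOFS =====

-- Common yardstick for both ports: the sum, over the positions p = a+i+1 (the list d sits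
-- after an already-consumed prefix of length a) that are multiples of mN, of d[i]*mN —
-- each completed box of m fruits contributes its minimum (the element at the m-boundary) m times.
def offsetSum (mN a : Nat) (d : List Int) : Int :=
  ((List.range d.length).map (fun i => if mN ∣ (a + i + 1) then d.getD i 0 * (mN : Int) else 0)).sum

lemma offsetSum_of_no_mult {mN a : Nat} {d : List Int}
    (h : ∀ i < d.length, ¬ mN ∣ (a + i + 1)) : offsetSum mN a d = 0 := by
  unfold offsetSum
  apply List.sum_eq_zero
  intro x hx
  obtain ⟨i, hi, rfl⟩ := List.mem_map.mp hx
  rw [List.mem_range] at hi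
  simp [h i hi]

lemma offsetSum_append (mN a : Nat) (d₁ d₂ : List Int) :
    offsetSum mN a (d₁ ++ d₂) = offsetSum mN a d₁ + offsetSum mN (a + d₁.length) d₂ := by
  unfold offsetSum
  rw [List.length_append, List.range_add, List.map_append, List.sum_append, List.map_map]
  congr 1
  · refine congrArg List.sum (List.map_congr_left ?_)
    intro i hi
    rw [List.mem_range] at hi
    rw [List.getD_append _ _ _ _ hi]
  · refine congrArg List.sum (List.map_congr_left ?_)
    intro i hi
    simp only [Function.comp]
    rw [List.getD_append_right _ _ _ _ (by omega)]
    have h1 : a + (d₁.length + i) + 1 = a + d₁.length + i + 1 := by omega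
    have h2 : d₁.length + i - d₁.length = i := by omega
    rw [h1, h2]

lemma offsetSum_shift (mN a : Nat) (d : List Int) :
    offsetSum mN (a + mN) d = offsetSum mN a d := by
  unfold offsetSum
  refine congrArg List.sum (List.map_congr_left ?_)
  intro i _
  have h1 : a + mN + i + 1 = mN + (a + i + 1) := by omega
  rw [h1]
  simp [Nat.dvd_add_right (Nat.dvd_refl mN)]

lemma offsetSum_replicate {mN : Nat} (a c : Nat) (v : Int) :
    offsetSum mN a (List.replicate c v)
      = v * (mN : Int) * ((((a + c) / mN : Nat) : Int) - (((a / mN : Nat)) : Int)) := by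
  induction c with
  | zero => simp [offsetSum]
  | succ c ih =>
    unfold offsetSum at ih ⊢
    rw [List.length_replicate] at ih ⊢
    rw [List.range_succ, List.map_append, List.sum_append]
    have hmap : (List.range c).map
        (fun i => if mN ∣ a + i + 1 then (List.replicate (c+1) v).getD i 0 * (mN : Int) else 0)
        = (List.range c).map
        (fun i => if mN ∣ a + i + 1 then (List.replicate c v).getD i 0 * (mN : Int) else 0) := by
      apply List.map_congr_left
      intro i hi
      rw [List.mem_range] at hi
      rw [List.getD_eq_getElem?_getD, List.getD_eq_getElem?_getD,
        List.getElem?_replicate, List.getElem?_replicate]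
      simp [Nat.lt_succ_of_lt hi, hi]
    rw [hmap, ih]
    have hget : (List.replicate (c+1) v).getD c 0 = v := by
      rw [List.getD_eq_getElem?_getD, List.getElem?_replicate]
      simp
    have hdiv : (a + (c+1)) / mN = (a + c) / mN + if mN ∣ a + c + 1 then 1 else 0 := by
      have : a + (c + 1) = (a + c) + 1 := by omega
      rw [this, Nat.succ_div]
    simp only [List.map_cons, List.map_nil, List.sum_cons, List.sum_nil]
    rw [hget, hdiv]
    split_ifs with h
    · push_cast
      ring
    · push_cast
      ring

lemma offsetSum_short {mN : Nat} {d : List Int} (h : d.length < mN) :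
    offsetSum mN 0 d = 0 := by
  apply offsetSum_of_no_mult
  intro i hi hdvd
  have := Nat.le_of_dvd (by omega) hdvd
  omega

lemma offsetSum_chunk {mN : Nat} (hm : 0 < mN) {d : List Int} (h : mN ≤ d.length) :
    offsetSum mN 0 d = d.getD (mN - 1) 0 * (mN : Int) + offsetSum mN 0 (d.drop mN) := by
  conv_lhs => rw [← List.take_append_drop mN d]
  rw [offsetSum_append, List.length_take, Nat.min_eq_left h]
  have hshift : offsetSum mN (0 + mN) (d.drop mN) = offsetSum mN 0 (d.drop mN) := by
    have := offsetSum_shift mN 0 (d.drop mN); simpa using this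
  rw [hshift]
  congr 1
  unfold offsetSum
  rw [List.length_take, Nat.min_eq_left h]
  obtain ⟨m', rfl⟩ : ∃ m', mN = m' + 1 := ⟨mN - 1, by omega⟩
  rw [List.range_succ, List.map_append, List.sum_append]
  have hz : ((List.range m').map
      (fun i => if m' + 1 ∣ 0 + i + 1 then (d.take (m'+1)).getD i 0 * ((m'+1 : Nat) : Int) else 0)).sum = 0 := by
    apply List.sum_eq_zero
    intro x hx
    obtain ⟨i, hi, rfl⟩ := List.mem_map.mp hx
    rw [List.mem_range] at hi
    have hnd : ¬ (m' + 1) ∣ 0 + i + 1 := by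
      intro hdvd; have := Nat.le_of_dvd (by omega) hdvd; omega
    rw [if_neg hnd]
  rw [hz]
  have hdvd : (m' + 1) ∣ 0 + m' + 1 := by
    have : 0 + m' + 1 = m' + 1 := by omega
    rw [this]
  simp only [List.map_cons, List.map_nil, List.sum_cons, List.sum_nil, if_pos hdvd]
  have hget : (d.take (m'+1)).getD m' 0 = d.getD ((m'+1) - 1) 0 := by
    rw [List.getD_eq_getElem?_getD, List.getD_eq_getElem?_getD, List.getElem?_take]
    simp
  rw [hget]; ring

lemma innerA_spec : ∀ (t : Nat) (tmp s : List Int), t ≤ s.length →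
    innerA t tmp s = some (tmp ++ (s.drop (s.length - t)).reverse, s.take (s.length - t)) := by
  intro t
  induction t with
  | zero =>
    intro tmp s _
    simp [innerA]
  | succ t ih =>
    intro tmp s ht
    have hne : s ≠ [] := by intro h; subst h; simp at ht
    rcases List.eq_nil_or_concat s with h | ⟨s₀, x, rfl⟩
    · exact absurd h hne
    rw [List.concat_eq_append] at *
    rw [innerA, PySem.List.pop?_last]
    simp only []
    rw [ih (tmp ++ [x]) s₀ (by simp only [List.length_append, List.length_cons, List.length_nil] at ht; omega)]
    have h1 : (s₀ ++ [x]).length - (t+1) = s₀.length - t := by simp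
    have h2 : s₀.length - t ≤ s₀.length := by omega
    rw [h1]
    congr 2
    · rw [List.drop_append_of_le_length h2, List.reverse_append]
      simp
    · rw [List.take_append_of_le_length h2]

lemma min_rev_sorted {s : List Int} (hs : s.Pairwise (· ≤ ·)) {j : Nat} (hj : j < s.length) :
    PySem.List.min? ((s.drop j).reverse) (fun x => x) = some (s.getD j 0) := by
  have hd : s.drop j ≠ [] := by
    intro h
    have := List.drop_eq_nil_iff.mp h
    omega
  obtain ⟨y, rest, hyr⟩ := List.exists_cons_of_ne_nil hd
  have hy : y = s.getD j 0 := by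
    have : (s.drop j).getD 0 0 = s.getD j 0 := by
      rw [List.getD_eq_getElem?_getD, List.getD_eq_getElem?_getD, List.getElem?_drop]
      simp
    rw [hyr] at this
    simpa using this
  have hpd : (s.drop j).Pairwise (· ≤ ·) := List.Pairwise.drop hs
  have hmin : ∀ z ∈ (s.drop j).reverse, y ≤ z := by
    intro z hz
    rw [List.mem_reverse, hyr] at hz
    rcases List.mem_cons.mp hz with rfl | hz
    · exact le_refl _
    · rw [hyr] at hpd
      exact (List.pairwise_cons.mp hpd).1 z hz
  have hne : (s.drop j).reverse ≠ [] := by simpa using hd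
  obtain ⟨mn, hmn⟩ : ∃ mn, PySem.List.min? ((s.drop j).reverse) (fun x => x) = some mn := by
    cases h : PySem.List.min? ((s.drop j).reverse) (fun x => x) with
    | none => exact absurd ((PySem.List.min?_eq_none_iff _ _).mp h) hne
    | some mn => exact ⟨mn, rfl⟩
  have h1 : mn ∈ (s.drop j).reverse := PySem.List.min?_mem hmn
  have h2 := PySem.List.min?_isMin hmn
  have hymem : y ∈ (s.drop j).reverse := by rw [List.mem_reverse, hyr]; exact List.mem_cons_self
  have : mn = y := le_antisymm (h2 y hymem) (hmin mn h1)
  rw [hmn, this, hy]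

lemma outerA_eq {mN : Nat} (hm : 0 < mN) : ∀ (fuel : Nat) (s : List Int) (ans : Int),
    s.Pairwise (· ≤ ·) → mN ≤ s.length → s.length ≤ fuel →
    outerA (mN : Int) fuel s ans = ans + offsetSum mN 0 s.reverse := by
  intro fuel
  induction fuel with
  | zero => intro s ans _ h1 h2; omega
  | succ fuel ih =>
    intro s ans hp h1 h2
    have hj : s.length - mN < s.length := by omega
    rw [outerA, Int.toNat_natCast,
      innerA_spec mN [] s (by omega)]
    simp only [List.nil_append]
    rw [min_rev_sorted hp hj]
    have hlt : (s.drop (s.length - mN)).reverse.length = mN := by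
      simp; omega
    rw [hlt]
    dsimp only
    have hlens' : (s.take (s.length - mN)).length = s.length - mN := by
      simp
    have hrev : s.reverse.getD (mN - 1) 0 = s.getD (s.length - mN) 0 := by
      rw [List.getD_eq_getElem _ _ (by simp; omega),
          List.getD_eq_getElem _ _ (by omega),
          List.getElem_reverse]
      congr 1
      omega
    have hdrop : s.reverse.drop mN = (s.take (s.length - mN)).reverse := by
      rw [List.drop_reverse]
    have hchunk := offsetSum_chunk hm (d := s.reverse) (by simp; omega)
    rw [hrev, hdrop] at hchunk
    by_cases hcase : ((s.take (s.length - mN)).length : Int) < (mN : Int)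
    · rw [if_pos hcase, hchunk]
      have : offsetSum mN 0 (s.take (s.length - mN)).reverse = 0 := by
        apply offsetSum_short
        rw [List.length_reverse, hlens']
        rw [hlens'] at hcase
        exact_mod_cast hcase
      rw [this]
      ring
    · rw [if_neg hcase]
      rw [ih (s.take (s.length - mN)) _ (hp.take) (by rw [hlens']; omega)
            (by rw [hlens']; omega)]
      rw [hchunk]
      ring

-- descending sort of an Int list is the reverse of the ascending one
lemma sorted_true_eq_reverse (xs : List Int) :
    PySem.List.sorted xs (fun x => x) true = (PySem.List.sorted xs (fun x => x) false).reverse := by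
  apply List.Perm.eq_of_pairwise (le := fun (a b : Int) => b ≤ a)
  · intro a b _ _ h1 h2; omega
  · exact PySem.List.sorted_pairwise_rev xs (fun x => x)
  · rw [List.pairwise_reverse]
    exact PySem.List.sorted_pairwise xs (fun x => x)
  · exact (PySem.List.sorted_perm xs (fun x => x) true).trans
      ((PySem.List.sorted_perm xs (fun x => x) false).symm.trans (List.reverse_perm _).symm)

lemma count_flatMap_replicate (xs : List Int) : ∀ (ks : List Int), ks.Nodup → ∀ w : Int,
    List.count w (ks.flatMap (fun v => List.replicate (List.count v xs) v))
      = if w ∈ ks then List.count w xs else 0 := by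
  intro ks
  induction ks with
  | nil => intro _ w; simp
  | cons v t ih =>
    intro hnd w
    rw [List.flatMap_cons, List.count_append, ih (List.nodup_cons.mp hnd).2 w]
    rw [List.count_replicate]
    by_cases hw : w = v
    · subst hw
      have : w ∉ t := (List.nodup_cons.mp hnd).1
      simp [this]
    · simp [hw, Ne.symm hw, List.mem_cons]

lemma flatMap_runs_pairwise (xs : List Int) : ∀ (ks : List Int), ks.Pairwise (· > ·) →
    (ks.flatMap (fun v => List.replicate (List.count v xs) v)).Pairwise (fun a b => b ≤ a) := by
  intro ks
  induction ks with
  | nil => intro _; simp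
  | cons v t ih =>
    intro hp
    obtain ⟨hv, ht⟩ := List.pairwise_cons.mp hp
    rw [List.flatMap_cons, List.pairwise_append]
    refine ⟨?_, ih ht, ?_⟩
    · rw [List.pairwise_replicate]; right; omega
    · intro a ha b hb
      obtain rfl := (List.eq_of_mem_replicate ha)
      obtain ⟨u, hu, hb'⟩ := List.mem_flatMap.mp hb
      obtain rfl := (List.eq_of_mem_replicate hb')
      exact le_of_lt (hv _ hu)

-- the descending sorted list is the concatenation of its runs, one per distinct value
lemma desc_eq_flatMap (xs : List Int) :
    PySem.List.sorted xs (fun x => x) true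
      = (PySem.List.sorted (PySem.Set.ofList xs) (fun x => x) true).flatMap
          (fun v => List.replicate (List.count v xs) v) := by
  have hks_nodup : (PySem.List.sorted (PySem.Set.ofList xs) (fun x => x) true).Nodup :=
    (PySem.List.sorted_perm _ _ _).nodup_iff.mpr (PySem.Set.nodup_ofList xs)
  have hks_gt : (PySem.List.sorted (PySem.Set.ofList xs) (fun x => x) true).Pairwise (· > ·) := by
    rw [sorted_true_eq_reverse, List.pairwise_reverse]
    exact PySem.List.sorted_ofList_pairwise_lt xs
  apply List.Perm.eq_of_pairwise (le := fun (a b : Int) => b ≤ a)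
  · intro a b _ _ h1 h2; omega
  · exact PySem.List.sorted_pairwise_rev xs (fun x => x)
  · exact flatMap_runs_pairwise xs _ hks_gt
  · rw [List.perm_iff_count]
    intro w
    rw [count_flatMap_replicate xs _ hks_nodup w]
    have hmem : w ∈ PySem.List.sorted (PySem.Set.ofList xs) (fun x => x) true ↔ w ∈ xs := by
      rw [PySem.List.mem_sorted, PySem.Set.mem_ofList]
    by_cases hw : w ∈ xs
    · rw [if_pos (hmem.mpr hw)]
      exact (PySem.List.sorted_perm xs (fun x => x) true).count_eq w
    · rw [if_neg (fun h => hw (hmem.mp h))]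
      rw [List.count_eq_zero_of_not_mem
        (fun h => hw ((PySem.List.mem_sorted _ _ _ _).mp h))]

lemma bfold {m : Int} {mN : Nat} (hmn : m = (mN : Int)) (score : List Int) :
    ∀ (ks : List Int) (a : Nat) (t : Int),
    (ks.foldl (fun (p : Int × Int) v =>
        (p.1 + v * m * (PySem.Int.floordiv (p.2 + (List.count v score : Int)) m
            - PySem.Int.floordiv p.2 m),
         p.2 + (List.count v score : Int))) (t, (a : Int))).1
      = t + offsetSum mN a (ks.flatMap (fun v => List.replicate (List.count v score) v)) := by
  intro ks
  induction ks with
  | nil =>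
    intro a t
    simp [offsetSum]
  | cons v ks ih =>
    intro a t
    rw [List.foldl_cons]
    have hc1 : (a : Int) + (List.count v score : Int) = ((a + List.count v score : Nat) : Int) := by
      push_cast; ring
    have hstep :
        ((t + v * m * (PySem.Int.floordiv ((a : Int) + (List.count v score : Int)) m
            - PySem.Int.floordiv (a : Int) m),
          (a : Int) + (List.count v score : Int)) : Int × Int)
        = (t + offsetSum mN a (List.replicate (List.count v score) v),
          ((a + List.count v score : Nat) : Int)) := by
      rw [hc1, hmn, PySem.Int.floordiv_natCast, PySem.Int.floordiv_natCast,
        offsetSum_replicate]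
    rw [hstep, ih (a + List.count v score) _]
    rw [List.flatMap_cons, offsetSum_append, List.length_replicate]
    ring

lemma solution_eq {m : Int} (k : Int) (score : List Int) (hm : 1 ≤ m) :
    solution k m score = offsetSum m.toNat 0 (PySem.List.sorted score (fun x => x)).reverse := by
  have hmn : m = (m.toNat : Int) := (Int.toNat_of_nonneg (by omega)).symm
  have hmpos : 0 < m.toNat := by omega
  unfold solution
  set s := PySem.List.sorted score (fun x => x) with hs
  by_cases hlt : ((s.length : Int) < m)
  · rw [if_pos hlt]
    rw [offsetSum_short (by rw [List.length_reverse]; omega)]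
  · rw [if_neg hlt]
    rw [hmn]
    rw [outerA_eq hmpos s.length s 0
      (by rw [hs]; exact PySem.List.sorted_pairwise score (fun x => x))
      (by omega) (le_refl _)]
    rw [Int.toNat_natCast]
    ring

lemma solution_alt_eq {m : Int} (k : Int) (score : List Int) (hm : 1 ≤ m) :
    solution_alt k m score = offsetSum m.toNat 0 (PySem.List.sorted score (fun x => x)).reverse := by
  have hmn : m = (m.toNat : Int) := (Int.toNat_of_nonneg (by omega)).symm
  unfold solution_alt
  rw [PySem.Dict.foldl_insert_getD_add_one_eq_counter]
  dsimp only
  rw [PySem.Dict.keys_counter]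
  set ks := PySem.List.sorted (PySem.Set.ofList score) (fun x => x) true with hks
  have hcongr : (ks.foldl (fun (p : Int × Int) v =>
        let c := (PySem.Dict.counter score).getD v 0
        (p.1 + v * m * (PySem.Int.floordiv (p.2 + c) m - PySem.Int.floordiv p.2 m),
         p.2 + c)) ((0 : Int), (0 : Int)))
      = (ks.foldl (fun (p : Int × Int) v =>
        (p.1 + v * m * (PySem.Int.floordiv (p.2 + (List.count v score : Int)) m
            - PySem.Int.floordiv p.2 m),
         p.2 + (List.count v score : Int))) ((0 : Int), (0 : Int))) := by
    apply PySem.List.foldl_congr_mem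
    intro acc x _
    simp only [PySem.Dict.getD_counter]
  rw [hcongr]
  have h0 : ((0 : Int), (0 : Int)) = ((0 : Int), ((0 : Nat) : Int)) := by norm_num
  rw [h0, bfold hmn score ks 0 0, ← desc_eq_flatMap score, sorted_true_eq_reverse]
  ring

-- ===== VERDICT (by name: the statement is the Claim_ definition above) =====
theorem solution_spec : Claim_equal_solution := by
  intro k m score _hd hm
  unfold Spec_solution
  rw [solution_eq k score hm, solution_alt_eq k score hm]
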